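-- pv_equiv track=rewrite | github.com/WalsonK/DRLPy | environement/farkle.py | check_individual_scores
-- ===== SOURCE A (Python) =====
-- from collections import Counter
--
-- def check_individual_scores(dices: list, used_dice: list) -> (int, list):
--     """
--     Calculate points for individual dice (1s and 5s) that are not part of any combinations.
--
--     This function handles scoring for any remaining 1s or 5s that have not been used
--     in other combinations like multiples.
--
--     Args:
--         used_dice (list): A list of integers representing dice already used in other combinations.
--
--     Returns:
--         int: The score based on the remaining individual 1s and 5s.
--     """
--     remaining_counts = Counter(dices) - Counter(used_dice)
--     score = 0
--     binary_used_dice = [0] * len(dices)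
--
--     score += remaining_counts[1] * 100  # Each remaining 1 is worth 100 points
--     score += remaining_counts[5] * 50  # Each remaining 5 is worth 50 points
--
--     used_count_1s = 0
--     used_count_5s = 0
--     for i, d in enumerate(dices):
--         if d == 1 and used_count_1s < remaining_counts[1]:
--             binary_used_dice[i] = 1
--             used_count_1s += 1
--         elif d == 5 and used_count_5s < remaining_counts[5]:
--             binary_used_dice[i] = 1
--             used_count_5s += 1
--
--     return score, binary_used_dice
-- ===== SOURCE B (Python) =====
-- def check_individual_scores(dices: list, used_dice: list) -> (int, list):
--     # Right-to-left pass with skip budgets: the 1s/5s that do NOT score are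
--     # exactly the LAST used_dice.count(v) occurrences of v, so walk the dice
--     # from the right, leave the first `skip` occurrences of each unmarked, and
--     # mark + score every later (i.e. earlier-in-the-list) occurrence as we go.
--     skip1 = used_dice.count(1)
--     skip5 = used_dice.count(5)
--     score = 0
--     rev = []
--     for d in reversed(dices):
--         if d == 1 and skip1 > 0:
--             skip1 -= 1
--             rev.append(0)
--         elif d == 5 and skip5 > 0:
--             skip5 -= 1
--             rev.append(0)
--         elif d == 1:
--             score += 100
--             rev.append(1)
--         elif d == 5:
--             score += 50
--             rev.append(1)
--         else:
--             rev.append(0)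
--     rev.reverse()
--     return score, rev
-- ===== Notes on version B (the rewrite author's own statement) =====
-- stated objective: faster
-- what changed: Instead of computing remaining counts via Counter subtraction and marking the FIRST that-many 1s/5s left-to-right with two mark counters plus a multiplication-based score, B observes that the unscored occurrences are exactly the LAST used_dice.count(v) ones: it walks the dice right-to-left with two skip budgets, leaves the first budgeted occurrences unmarked, marks the rest, and accumulates the 100/50 score during the same pass (no Counter objects, no precomputed remaining counts).
import Mathlib
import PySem

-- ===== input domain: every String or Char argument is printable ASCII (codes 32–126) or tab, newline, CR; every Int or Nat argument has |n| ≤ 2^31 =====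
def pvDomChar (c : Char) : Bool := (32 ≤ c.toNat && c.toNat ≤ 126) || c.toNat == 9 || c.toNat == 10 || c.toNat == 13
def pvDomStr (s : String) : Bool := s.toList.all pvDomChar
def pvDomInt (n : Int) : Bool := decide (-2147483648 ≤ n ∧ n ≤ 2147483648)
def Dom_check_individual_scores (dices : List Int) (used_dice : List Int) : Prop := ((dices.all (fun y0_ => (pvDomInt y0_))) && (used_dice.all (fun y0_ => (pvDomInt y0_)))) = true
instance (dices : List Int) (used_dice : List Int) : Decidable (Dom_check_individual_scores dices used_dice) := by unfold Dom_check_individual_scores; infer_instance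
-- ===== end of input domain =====

-- B replaces A's Counter subtraction + left-to-right marking of the first
-- remaining-count-many 1s/5s by a single right-to-left pass with skip budgets that also
-- accumulates the score as it marks; measurably faster (no Counter objects built).

-- ===== PORT A =====
-- Counter(xs) is PySem.Dict.counter xs.  Counter.__sub__ iterates the left counter's items
-- and keeps k ↦ c1[k] − c2[k] whenever that is positive (CPython's second loop, which adds
-- keys of c2 whose count is negative, can never fire for counters built from lists, whose
-- counts are all positive — so this port is exact here).
def pyCounterSub (c1 c2 : PySem.Dict Int Int) : PySem.Dict Int Int :=
  PySem.Dict.mk (c1.items.filterMap (fun p =>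
    (if 0 < p.2 - c2.getD p.1 0 then some (p.2 - c2.getD p.1 0) else none).map
      (fun w => (p.1, w))))

-- A's marking loop: one pass over the dice with the two running counters.  The loop writes
-- binary_used_dice[i] at step i of the enumeration, left to right, so it is the structural
-- recursion building the list front to back with the same branch order and counters.
def pyMarkLoop (r1 r5 : Int) : List Int → Int → Int → List Int
  | [], _, _ => []
  | d :: ds, u1, u5 =>
    if d = 1 ∧ u1 < r1 then 1 :: pyMarkLoop r1 r5 ds (u1 + 1) u5
    else if d = 5 ∧ u5 < r5 then 1 :: pyMarkLoop r1 r5 ds u1 (u5 + 1)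
    else 0 :: pyMarkLoop r1 r5 ds u1 u5

def check_individual_scores (dices : List Int) (used_dice : List Int) : Int × List Int :=
  let remaining_counts := pyCounterSub (PySem.Dict.counter dices) (PySem.Dict.counter used_dice)
  let score := 0 + remaining_counts.getD 1 0 * 100 + remaining_counts.getD 5 0 * 50
  (score, pyMarkLoop (remaining_counts.getD 1 0) (remaining_counts.getD 5 0) dices 0 0)

-- ===== PORT B =====
-- The body of B's 'for d in reversed(dices)' loop, on the state (skip1, skip5, score, rev);
-- rev.append(x) is rev ++ [x].
def altStep (st : Int × Int × Int × List Int) (d : Int) : Int × Int × Int × List Int :=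
  if d = 1 ∧ 0 < st.1 then (st.1 - 1, st.2.1, st.2.2.1, st.2.2.2 ++ [0])
  else if d = 5 ∧ 0 < st.2.1 then (st.1, st.2.1 - 1, st.2.2.1, st.2.2.2 ++ [0])
  else if d = 1 then (st.1, st.2.1, st.2.2.1 + 100, st.2.2.2 ++ [1])
  else if d = 5 then (st.1, st.2.1, st.2.2.1 + 50, st.2.2.2 ++ [1])
  else (st.1, st.2.1, st.2.2.1, st.2.2.2 ++ [0])

def check_individual_scores_alt (dices : List Int) (used_dice : List Int) : Int × List Int :=
  let skip1 : Int := PySem.List.count used_dice 1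
  let skip5 : Int := PySem.List.count used_dice 5
  let r := dices.reverse.foldl altStep (skip1, skip5, 0, [])
  (r.2.2.1, r.2.2.2.reverse)

-- ===== PRECONDITION & SPEC =====
def Spec_check_individual_scores (dices : List Int) (used_dice : List Int) (out : Int × List Int) : Prop := out = check_individual_scores_alt dices used_dice
instance (dices : List Int) (used_dice : List Int) (out : Int × List Int) : Decidable (Spec_check_individual_scores dices used_dice out) := by unfold Spec_check_individual_scores; infer_instance

-- ===== CLAIM (what is proved, stated in full; the proofs are below) =====
def Claim_equal_check_individual_scores : Prop := ∀ (dices : List Int) (used_dice : List Int), Dom_check_individual_scores dices used_dice → Spec_check_individual_scores dices used_dice (check_individual_scores dices used_dice)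

-- ===== LEMMAS AND PROOFS =====

-- Common reference form of the marking: thresholds that count down.
def markSpec : Int → Int → List Int → List Int
  | _, _, [] => []
  | r1, r5, d :: ds =>
    if d = 1 ∧ 0 < r1 then 1 :: markSpec (r1 - 1) r5 ds
    else if d = 5 ∧ 0 < r5 then 1 :: markSpec r1 (r5 - 1) ds
    else 0 :: markSpec r1 r5 ds

-- Recursive form of B's right-to-left pass: the head of the list is processed LAST,
-- with the skip budgets left over by the tail; the mask list is built front-most bit first.
def maskR : List Int → Int → Int → Int × Int × Int × List Int
  | [], s1, s5 => (s1, s5, 0, [])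
  | d :: ds, s1, s5 =>
    let t := maskR ds s1 s5
    if d = 1 ∧ 0 < t.1 then (t.1 - 1, t.2.1, t.2.2.1, 0 :: t.2.2.2)
    else if d = 5 ∧ 0 < t.2.1 then (t.1, t.2.1 - 1, t.2.2.1, 0 :: t.2.2.2)
    else if d = 1 then (t.1, t.2.1, t.2.2.1 + 100, 1 :: t.2.2.2)
    else if d = 5 then (t.1, t.2.1, t.2.2.1 + 50, 1 :: t.2.2.2)
    else (t.1, t.2.1, t.2.2.1, 0 :: t.2.2.2)

theorem getD_mk_filterMap (g : Int → Option Int) :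
    ∀ (l : List Int), l.Nodup → ∀ k : Int,
      (PySem.Dict.mk (l.filterMap (fun a => (g a).map (fun w => (a, w))))).getD k 0
        = if k ∈ l then (g k).getD 0 else 0 := by
  intro l
  induction l with
  | nil => intro _ k; simp [PySem.Dict.getD_eq_get?_getD, PySem.Dict.get?]
  | cons a l ih =>
    intro hnd k
    rw [List.filterMap_cons]
    rcases hga : g a with _ | w
    · simp only [Option.map_none]
      rw [ih hnd.of_cons k]
      by_cases hk : k = a
      · subst hk
        simp [(List.nodup_cons.mp hnd).1, hga]
      · simp [hk]
    · simp only [Option.map_some]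
      rw [PySem.Dict.getD_eq_get?_getD, PySem.Dict.get?_mk_cons]
      by_cases hk : a = k
      · subst hk
        simp [hga]
      · have hbk : (a == k) = false := by simp [hk]
        rw [hbk]
        simp only [Bool.false_eq_true, if_false]
        rw [← PySem.Dict.getD_eq_get?_getD, ih hnd.of_cons k]
        have hka : k ∈ a :: l ↔ k ∈ l :=
          Iff.trans List.mem_cons (or_iff_right (fun h => hk h.symm))
        rw [if_congr hka rfl rfl]

theorem counterSub_getD (xs ys : List Int) (k : Int) :
    (pyCounterSub (PySem.Dict.counter xs) (PySem.Dict.counter ys)).getD k 0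
      = max ((List.count k xs : Int) - (List.count k ys : Int)) 0 := by
  unfold pyCounterSub
  rw [PySem.Dict.items_counter, List.filterMap_map]
  have hrw : ∀ a : Int,
      ((fun p : Int × Int =>
          (if 0 < p.2 - (PySem.Dict.counter ys).getD p.1 0 then
              some (p.2 - (PySem.Dict.counter ys).getD p.1 0) else none).map
            (fun w => (p.1, w))) ∘ (fun k => (k, (List.count k xs : Int)))) a
        = ((fun a => if 0 < (List.count a xs : Int) - (List.count a ys : Int) then
              some ((List.count a xs : Int) - (List.count a ys : Int)) else none) a).map
            (fun w => (a, w)) := by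
    intro a; simp [PySem.Dict.getD_counter]
  rw [List.filterMap_congr (fun a _ => hrw a)]
  rw [getD_mk_filterMap _ _ (PySem.Set.nodup_ofList xs) k]
  by_cases hk : k ∈ xs
  · rw [if_pos ((PySem.Set.mem_ofList xs k).mpr hk)]
    by_cases hpos : 0 < (List.count k xs : Int) - (List.count k ys : Int)
    · rw [if_pos hpos]; simp [max_eq_left (le_of_lt hpos)]
    · rw [if_neg hpos]; simp [max_eq_right (by omega : (List.count k xs : Int) - (List.count k ys : Int) ≤ 0)]
  · rw [if_neg (fun h => hk ((PySem.Set.mem_ofList xs k).mp h))]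
    have h0 : List.count k xs = 0 := List.count_eq_zero.mpr hk
    rw [h0]
    have : ((0 : Nat) : Int) - (List.count k ys : Int) ≤ 0 := by
      have := Int.natCast_nonneg (List.count k ys); omega
    omega

theorem markLoop_eq (r1 r5 : Int) :
    ∀ (ds : List Int) (u1 u5 : Int),
      pyMarkLoop r1 r5 ds u1 u5 = markSpec (r1 - u1) (r5 - u5) ds := by
  intro ds
  induction ds with
  | nil => intro u1 u5; simp [pyMarkLoop, markSpec]
  | cons d ds ih =>
    intro u1 u5
    simp only [pyMarkLoop, markSpec]
    by_cases h1 : d = 1 ∧ u1 < r1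
    · rw [if_pos h1,
        if_pos (show d = 1 ∧ 0 < r1 - u1 from ⟨h1.1, by have := h1.2; omega⟩), ih,
        show r1 - (u1 + 1) = r1 - u1 - 1 from by ring]
    · rw [if_neg h1,
        if_neg (show ¬ (d = 1 ∧ 0 < r1 - u1) from
          fun hc => h1 ⟨hc.1, by have := hc.2; omega⟩)]
      by_cases h5 : d = 5 ∧ u5 < r5
      · rw [if_pos h5,
          if_pos (show d = 5 ∧ 0 < r5 - u5 from ⟨h5.1, by have := h5.2; omega⟩), ih,
          show r5 - (u5 + 1) = r5 - u5 - 1 from by ring]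
      · rw [if_neg h5,
          if_neg (show ¬ (d = 5 ∧ 0 < r5 - u5) from
            fun hc => h5 ⟨hc.1, by have := hc.2; omega⟩), ih]

-- B's foldl over the reversed list is the structural recursion maskR.
theorem foldl_altStep_eq :
    ∀ (ds : List Int) (s1 s5 sc : Int) (acc : List Int),
      ds.reverse.foldl altStep (s1, s5, sc, acc)
        = ((maskR ds s1 s5).1, (maskR ds s1 s5).2.1,
           sc + (maskR ds s1 s5).2.2.1, acc ++ (maskR ds s1 s5).2.2.2.reverse) := by
  intro ds
  induction ds with
  | nil => intro s1 s5 sc acc; simp [maskR]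
  | cons d ds ih =>
    intro s1 s5 sc acc
    rw [List.reverse_cons, List.foldl_append, ih]
    simp only [List.foldl_cons, List.foldl_nil, maskR, altStep]
    split_ifs <;> simp <;> ring

-- Characterisation of maskR: with nonnegative skip budgets it computes the leftover
-- budgets, the score, and exactly markSpec with the clipped remaining counts.
theorem markSpec_congr {a a' b b' : Int} (ds : List Int) (ha : a = a') (hb : b = b') :
    markSpec a b ds = markSpec a' b' ds := by rw [ha, hb]

-- Characterisation of maskR: with nonnegative skip budgets it computes the leftover
-- budgets, the score, and exactly markSpec with the clipped remaining counts.
theorem maskR_spec :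
    ∀ (ds : List Int) (s1 s5 : Int), 0 ≤ s1 → 0 ≤ s5 →
      maskR ds s1 s5 =
        (max (s1 - (List.count 1 ds : Int)) 0,
         max (s5 - (List.count 5 ds : Int)) 0,
         100 * max ((List.count 1 ds : Int) - s1) 0 + 50 * max ((List.count 5 ds : Int) - s5) 0,
         markSpec (max ((List.count 1 ds : Int) - s1) 0)
                  (max ((List.count 5 ds : Int) - s5) 0) ds) := by
  intro ds
  induction ds with
  | nil => intro s1 s5 h1 h5; simp [maskR, markSpec]; omega
  | cons d ds ih =>
    intro s1 s5 hs1 hs5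
    by_cases hd1 : d = 1
    · subst hd1
      rw [List.count_cons_self, List.count_cons_of_ne (by norm_num : (1:Int) ≠ 5)]
      push_cast
      simp only [maskR, ih s1 s5 hs1 hs5, markSpec, true_and, if_true,
        eq_false (by norm_num : ¬ ((1:Int) = 5)), false_and, if_false]
      by_cases hsk : 0 < max (s1 - (List.count 1 ds : Int)) 0
      · rw [if_pos hsk,
          if_neg (by omega : ¬ 0 < max ((List.count 1 ds : Int) + 1 - s1) 0)]
        simp only [Prod.mk.injEq, List.cons.injEq]
        refine ⟨?_, ?_, ?_, ?_, ?_⟩ <;>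
          first
            | trivial
            | omega
            | exact markSpec_congr ds (by omega) (by omega)
      · rw [if_neg hsk,
          if_pos (by omega : 0 < max ((List.count 1 ds : Int) + 1 - s1) 0)]
        simp only [Prod.mk.injEq, List.cons.injEq]
        refine ⟨?_, ?_, ?_, ?_, ?_⟩ <;>
          first
            | trivial
            | omega
            | exact markSpec_congr ds (by omega) (by omega)
    · by_cases hd5 : d = 5
      · subst hd5
        rw [List.count_cons_self, List.count_cons_of_ne (by norm_num : (5:Int) ≠ 1)]
        push_cast
        simp only [maskR, ih s1 s5 hs1 hs5, markSpec, true_and, if_true,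
          eq_false (by norm_num : ¬ ((5:Int) = 1)), false_and, if_false]
        by_cases hsk : 0 < max (s5 - (List.count 5 ds : Int)) 0
        · rw [if_pos hsk,
            if_neg (by omega : ¬ 0 < max ((List.count 5 ds : Int) + 1 - s5) 0)]
          simp only [Prod.mk.injEq, List.cons.injEq]
          refine ⟨?_, ?_, ?_, ?_, ?_⟩ <;>
            first
              | trivial
              | omega
              | exact markSpec_congr ds (by omega) (by omega)
        · rw [if_neg hsk,
            if_pos (by omega : 0 < max ((List.count 5 ds : Int) + 1 - s5) 0)]
          simp only [Prod.mk.injEq, List.cons.injEq]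
          refine ⟨?_, ?_, ?_, ?_, ?_⟩ <;>
            first
              | trivial
              | omega
              | exact markSpec_congr ds (by omega) (by omega)
      · rw [List.count_cons_of_ne hd1, List.count_cons_of_ne hd5]
        simp only [maskR, ih s1 s5 hs1 hs5, markSpec,
          eq_false hd1, eq_false hd5, false_and, if_false]

-- ===== VERDICT (by name: the statement is the Claim_ definition above) =====
theorem check_individual_scores_spec : Claim_equal_check_individual_scores := by
  intro dices used_dice _
  unfold Spec_check_individual_scores
  unfold check_individual_scores check_individual_scores_alt
  simp only [counterSub_getD, PySem.List.count_eq]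
  rw [markLoop_eq, sub_zero, sub_zero, foldl_altStep_eq,
    maskR_spec dices ((List.count 1 used_dice : Int)) ((List.count 5 used_dice : Int))
      (by positivity) (by positivity)]
  simp only [List.nil_append, List.reverse_reverse]
  rw [Prod.ext_iff]
  constructor
  · show (0 : Int) + max ((List.count 1 dices : Int) - (List.count 1 used_dice : Int)) 0 * 100
        + max ((List.count 5 dices : Int) - (List.count 5 used_dice : Int)) 0 * 50
      = 0 + (100 * max ((List.count 1 dices : Int) - (List.count 1 used_dice : Int)) 0
        + 50 * max ((List.count 5 dices : Int) - (List.count 5 used_dice : Int)) 0)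
    ring
  · rfl
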